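-- pv_equiv track=rewrite | github.com/tjblavakumar/AIechart | chatbot.py | _should_web_search
-- ===== SOURCE A (Python) =====
-- SEARCH_KEYWORDS = [
--     "why", "what happened", "what caused", "explain", "reason",
--     "context", "news", "event", "policy", "fed ", "federal reserve",
--     "inflation", "recession", "pandemic", "covid", "war", "crisis",
-- ]
--
-- YEAR_PATTERN_KEYWORDS = ["in 20", "in 19", "during 20", "since 20", "after 20", "before 20"]
--
-- def _should_web_search(query: str) -> bool:
--     """Check if query warrants a web search (Analyst Mode only)."""
--     query_lower = query.lower()
--     for kw in SEARCH_KEYWORDS: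
--         if kw in query_lower:
--             return True
--     for kw in YEAR_PATTERN_KEYWORDS:
--         if kw in query_lower:
--             return True
--     return False
-- ===== SOURCE B (Python) =====
-- SEARCH_KEYWORDS = [
--     "why", "what happened", "what caused", "explain", "reason",
--     "context", "news", "event", "policy", "fed ", "federal reserve",
--     "inflation", "recession", "pandemic", "covid", "war", "crisis",
-- ]
--
-- YEAR_PATTERN_KEYWORDS = ["in 20", "in 19", "during 20", "since 20", "after 20", "before 20"]
--
-- ALL_KEYWORDS = SEARCH_KEYWORDS + YEAR_PATTERN_KEYWORDS
--
-- def _should_web_search(query: str) -> bool: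
--     """Single left-to-right scan of the lowered query: at each position,
--     test whether any keyword starts there (position-major instead of
--     keyword-major repeated substring searches)."""
--     q = query.lower()
--     return any(
--         q.startswith(kw, i)
--         for i in range(len(q) + 1)
--         for kw in ALL_KEYWORDS
--     )
-- ===== Notes on version B (the rewrite author's own statement) =====
-- stated objective: alternative
-- what changed: Replaces A's keyword-major early-return loops of repeated substring searches with a single position-major left-to-right scan of the lowered query testing at each index whether any keyword starts there.
import Mathlib
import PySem

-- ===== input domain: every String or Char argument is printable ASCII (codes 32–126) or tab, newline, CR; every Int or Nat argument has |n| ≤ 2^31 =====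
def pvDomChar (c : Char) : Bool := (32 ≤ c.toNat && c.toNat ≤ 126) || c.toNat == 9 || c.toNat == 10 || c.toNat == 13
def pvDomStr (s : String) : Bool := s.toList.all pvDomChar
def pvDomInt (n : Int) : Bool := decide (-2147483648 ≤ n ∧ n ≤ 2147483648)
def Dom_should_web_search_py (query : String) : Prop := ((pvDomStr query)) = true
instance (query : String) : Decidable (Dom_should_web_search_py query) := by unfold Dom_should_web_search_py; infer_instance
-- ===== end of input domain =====

-- B replaces A's keyword-major early-return membership loops by a single
-- position-major scan of the lowered query (objective: alternative, same cost).

-- ===== PORT A =====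
def SEARCH_KEYWORDS : List String :=
  ["why", "what happened", "what caused", "explain", "reason",
   "context", "news", "event", "policy", "fed ", "federal reserve",
   "inflation", "recession", "pandemic", "covid", "war", "crisis"]

def YEAR_PATTERN_KEYWORDS : List String :=
  ["in 20", "in 19", "during 20", "since 20", "after 20", "before 20"]

-- the 'for kw in …: if kw in query_lower: return True' loop
def kwLoop : List String → String → Bool
  | [], _ => false
  | kw :: rest, q => if PySem.Str.isIn kw q then true else kwLoop rest q

def should_web_search_py (query : String) : Bool :=
  let query_lower := PySem.Str.lower query
  if kwLoop SEARCH_KEYWORDS query_lower then true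
  else if kwLoop YEAR_PATTERN_KEYWORDS query_lower then true
  else false

-- ===== PORT B =====
def ALL_KEYWORDS : List String := SEARCH_KEYWORDS ++ YEAR_PATTERN_KEYWORDS

-- q.startswith(kw, i) with 0 ≤ i ≤ len(q) is exactly: kw is a prefix of q[i:]
def should_web_search_py_alt (query : String) : Bool :=
  let q := PySem.Str.lower query
  (List.range (q.toList.length + 1)).any (fun i =>
    ALL_KEYWORDS.any (fun kw => PySem.Chars.startswith (q.toList.drop i) kw.toList))

-- ===== PRECONDITION & SPEC =====
def Spec_should_web_search_py (query : String) (out : Bool) : Prop := out = should_web_search_py_alt query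
instance (query : String) (out : Bool) : Decidable (Spec_should_web_search_py query out) := by unfold Spec_should_web_search_py; infer_instance

-- ===== CLAIM (what is proved, stated in full; the proofs are below) =====
def Claim_equal_should_web_search_py : Prop := ∀ (query : String), Dom_should_web_search_py query → Spec_should_web_search_py query (should_web_search_py query)

-- ===== LEMMAS AND PROOFS =====

theorem kwLoop_iff (kws : List String) (q : String) :
    kwLoop kws q = true ↔ ∃ kw ∈ kws, kw.toList <:+: q.toList := by
  induction kws with
  | nil => simp [kwLoop]
  | cons kw rest ih =>
      by_cases h : PySem.Str.isIn kw q = true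
      · have hinf := (PySem.Str.isIn_iff_infix kw q).mp h
        simp only [kwLoop, h, if_true, true_iff]
        exact ⟨kw, by simp, hinf⟩
      · have hni : ¬ kw.toList <:+: q.toList := fun hc =>
          h ((PySem.Str.isIn_iff_infix kw q).mpr hc)
        have h' : PySem.Chars.isIn kw.toList q.toList = false :=
          (PySem.Chars.isIn_eq_false_iff _ _).mpr hni
        simp [kwLoop, ih, h', hni]

theorem bounded_prefix (s sub : List Char) :
    (∃ i < s.length + 1, sub <+: s.drop i) ↔ ∃ j, sub <+: s.drop j := by
  constructor
  · rintro ⟨i, _, h⟩; exact ⟨i, h⟩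
  · rintro ⟨j, h⟩
    by_cases hj : j ≤ s.length
    · exact ⟨j, by omega, h⟩
    · refine ⟨s.length, by omega, ?_⟩
      rw [List.drop_length]
      rwa [List.drop_eq_nil_of_le (by omega)] at h

theorem alt_iff (query : String) :
    should_web_search_py_alt query = true ↔
      ∃ kw ∈ ALL_KEYWORDS, kw.toList <:+: (PySem.Str.lower query).toList := by
  unfold should_web_search_py_alt
  simp only [List.any_eq_true, List.mem_range]
  constructor
  · rintro ⟨i, hi, kw, hkw, hsw⟩
    refine ⟨kw, hkw, ?_⟩
    have hp := (PySem.Chars.startswith_iff _ _).mp hsw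
    exact (PySem.Chars.exists_prefix_drop_iff_isIn kw.toList _).mp ⟨i, hp⟩ |>
      (PySem.Chars.isIn_iff_infix _ _).mp
  · rintro ⟨kw, hkw, hinf⟩
    have := (PySem.Chars.exists_prefix_drop_iff_isIn kw.toList
      (PySem.Str.lower query).toList).mpr ((PySem.Chars.isIn_iff_infix _ _).mpr hinf)
    obtain ⟨i, hi, hp⟩ := (bounded_prefix _ _).mpr this
    exact ⟨i, hi, kw, hkw, (PySem.Chars.startswith_iff _ _).mpr hp⟩

theorem a_iff (query : String) :
    should_web_search_py query = true ↔
      ∃ kw ∈ ALL_KEYWORDS, kw.toList <:+: (PySem.Str.lower query).toList := by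
  unfold should_web_search_py ALL_KEYWORDS
  by_cases h1 : kwLoop SEARCH_KEYWORDS (PySem.Str.lower query) = true
  · obtain ⟨kw, hkw, hi⟩ := (kwLoop_iff _ _).mp h1
    simp [h1]
    exact ⟨kw, Or.inl hkw, by simpa using hi⟩
  · by_cases h2 : kwLoop YEAR_PATTERN_KEYWORDS (PySem.Str.lower query) = true
    · obtain ⟨kw, hkw, hi⟩ := (kwLoop_iff _ _).mp h2
      simp [h1, h2]
      exact ⟨kw, Or.inr hkw, by simpa using hi⟩
    · simp [h1, h2]
      rintro kw (hkw | hkw) hi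
      · exact h1 ((kwLoop_iff _ _).mpr ⟨kw, hkw, by simpa using hi⟩)
      · exact h2 ((kwLoop_iff _ _).mpr ⟨kw, hkw, by simpa using hi⟩)

-- ===== VERDICT (by name: the statement is the Claim_ definition above) =====
theorem should_web_search_py_spec : Claim_equal_should_web_search_py := by
  intro query _
  unfold Spec_should_web_search_py
  rw [Bool.eq_iff_iff, a_iff, alt_iff]
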